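-- pv_equiv track=rewrite | github.com/PhamDuc001/p4_tool | core/core_utils.py | _extract_block
-- ===== SOURCE A (Python) =====
-- from typing import List, Optional, Dict, Tuple, Any
--
-- def _extract_block(lines: List[str], start_header: str, next_header_list: List[str]) -> List[str]:
--     """Extract block of lines between headers"""
--     start = end = None
--     for idx, line in enumerate(lines):
--         if line.strip() == start_header:
--             start = idx
--             break
--     if start is None:
--         return []
--
--     for idx in range(start + 1, len(lines)):
--         if lines[idx].strip() in next_header_list:
--             end = idx
--             break
--     if end is None:
--         end = len(lines)
--     return lines[start:end]
-- ===== SOURCE B (Python) =====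
-- def _extract_block(lines, start_header, next_header_list):
--     """Extract block of lines between headers: single pass with a collecting flag."""
--     block = []
--     collecting = False
--     for line in lines:
--         if collecting:
--             if line.strip() in next_header_list:
--                 break
--             block.append(line)
--         elif line.strip() == start_header:
--             collecting = True
--             block.append(line)
--     return block
-- ===== Notes on version B (the rewrite author's own statement) =====
-- stated objective: simpler
-- what changed: Replaced A's two index-scans (enumerate for start, range scan for end) plus a final slice with one accumulator-threaded pass over the lines using a collecting flag.
import Mathlib
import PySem

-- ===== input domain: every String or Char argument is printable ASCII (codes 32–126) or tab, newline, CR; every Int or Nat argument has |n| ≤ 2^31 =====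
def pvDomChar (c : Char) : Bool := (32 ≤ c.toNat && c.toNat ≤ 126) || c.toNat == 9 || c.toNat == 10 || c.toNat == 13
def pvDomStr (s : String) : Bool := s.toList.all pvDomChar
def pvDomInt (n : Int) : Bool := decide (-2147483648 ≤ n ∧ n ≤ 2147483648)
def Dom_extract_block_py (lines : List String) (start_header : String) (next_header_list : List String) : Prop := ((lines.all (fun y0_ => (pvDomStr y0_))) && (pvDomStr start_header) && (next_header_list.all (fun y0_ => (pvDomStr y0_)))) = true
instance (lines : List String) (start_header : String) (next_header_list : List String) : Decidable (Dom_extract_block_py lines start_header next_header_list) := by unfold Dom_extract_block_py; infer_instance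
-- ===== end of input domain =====

-- B is one accumulator-threaded pass with a collecting flag instead of A's two index scans plus a slice (simpler decomposition; same cost).

-- ===== PORT A =====
-- first loop: 'for idx, line in enumerate(lines): if line.strip() == start_header: start = idx; break'
def pvAFindStart (start_header : String) : List String → Nat → Option Nat
  | [], _ => none
  | l :: ls, idx => if PySem.Str.strip l == start_header then some idx else pvAFindStart start_header ls (idx + 1)

-- second loop: 'for idx in range(start+1, len(lines)): if lines[idx].strip() in next_header_list: end = idx; break'
def pvAFindEnd (lines : List String) (next_header_list : List String) (idx : Nat) : Option Nat :=
  if h : idx < lines.length then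
    if next_header_list.contains (PySem.Str.strip lines[idx]) then some idx
    else pvAFindEnd lines next_header_list (idx + 1)
  else none
termination_by lines.length - idx

def extract_block_py (lines : List String) (start_header : String) (next_header_list : List String) : List String :=
  match pvAFindStart start_header lines 0 with
  | none => []
  | some start =>
    let endIdx : Nat := (pvAFindEnd lines next_header_list (start + 1)).getD lines.length
    PySem.List.slice lines (some (start : Int)) (some (endIdx : Int))

-- ===== PORT B =====
-- the single loop of Source B: state = (collecting flag); output built as the loop emits lines
def pvBLoop (start_header : String) (next_header_list : List String) : List String → Bool → List String
  | [], _ => []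
  | l :: ls, true =>
    if next_header_list.contains (PySem.Str.strip l) then []
    else l :: pvBLoop start_header next_header_list ls true
  | l :: ls, false =>
    if PySem.Str.strip l == start_header then l :: pvBLoop start_header next_header_list ls true
    else pvBLoop start_header next_header_list ls false

def extract_block_py_alt (lines : List String) (start_header : String) (next_header_list : List String) : List String :=
  pvBLoop start_header next_header_list lines false

-- ===== PRECONDITION & SPEC =====
def Spec_extract_block_py (lines : List String) (start_header : String) (next_header_list : List String) (out : List String) : Prop := out = extract_block_py_alt lines start_header next_header_list
instance (lines : List String) (start_header : String) (next_header_list : List String) (out : List String) : Decidable (Spec_extract_block_py lines start_header next_header_list out) := by unfold Spec_extract_block_py; infer_instance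

-- ===== CLAIM (what is proved, stated in full; the proofs are below) =====
def Claim_equal_extract_block_py : Prop := ∀ (lines : List String) (start_header : String) (next_header_list : List String), Dom_extract_block_py lines start_header next_header_list → Spec_extract_block_py lines start_header next_header_list (extract_block_py lines start_header next_header_list)

-- ===== LEMMAS AND PROOFS =====

-- the end index A finds is at least where the scan started
theorem pvAFindEnd_ge (lines next_header_list : List String) (idx e : Nat)
    (h : pvAFindEnd lines next_header_list idx = some e) : idx ≤ e := by
  fun_induction pvAFindEnd lines next_header_list idx <;> simp_all <;> omega

-- B's collecting phase is takeWhile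
theorem pvBLoop_true (start_header : String) (next_header_list : List String) (ls : List String) :
    pvBLoop start_header next_header_list ls true
      = ls.takeWhile (fun l => !next_header_list.contains (PySem.Str.strip l)) := by
  induction ls with
  | nil => rfl
  | cons l ls ih =>
    by_cases h : next_header_list.contains (PySem.Str.strip l) = true <;>
      simp [pvBLoop, List.takeWhile_cons, h, ih]

-- A's end scan + take is takeWhile on the suffix
theorem pvAFindEnd_take (lines next_header_list : List String) (idx : Nat) :
    (lines.drop idx).take ((pvAFindEnd lines next_header_list idx).getD lines.length - idx)
      = (lines.drop idx).takeWhile (fun l => !next_header_list.contains (PySem.Str.strip l)) := by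
  fun_induction pvAFindEnd lines next_header_list idx with
  | case1 idx h hc =>
    have hdrop : List.drop idx lines = lines[idx] :: List.drop (idx + 1) lines :=
      List.drop_eq_getElem_cons h
    rw [hdrop, List.takeWhile_cons]
    rw [if_neg (by simp [List.mem_of_elem_eq_true hc])]
    simp
  | case2 idx h hc ih =>
    have hdrop : List.drop idx lines = lines[idx] :: List.drop (idx + 1) lines :=
      List.drop_eq_getElem_cons h
    have hge : idx + 1 ≤ (pvAFindEnd lines next_header_list (idx + 1)).getD lines.length := by
      cases he : pvAFindEnd lines next_header_list (idx + 1) with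
      | none => simpa using h
      | some e => simpa using pvAFindEnd_ge lines next_header_list (idx + 1) e he
    have harith : (pvAFindEnd lines next_header_list (idx + 1)).getD lines.length - idx
        = ((pvAFindEnd lines next_header_list (idx + 1)).getD lines.length - (idx + 1)) + 1 := by
      omega
    rw [hdrop, harith, List.take_succ_cons, List.takeWhile_cons, ih]
    rw [if_pos (by simp; exact fun hmem => hc (List.elem_eq_true_of_mem hmem))]
  | case3 idx h =>
    have : lines.length ≤ idx := by omega
    simp [List.drop_eq_nil_of_le this]

theorem pvMain (lines : List String) (start_header : String) (next_header_list : List String)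
    (i : Nat) (hi : i ≤ lines.length) :
    (match pvAFindStart start_header (lines.drop i) i with
     | none => ([] : List String)
     | some s =>
       PySem.List.slice lines (some (s : Int))
         (some (((pvAFindEnd lines next_header_list (s + 1)).getD lines.length : Nat) : Int)))
      = pvBLoop start_header next_header_list (lines.drop i) false := by
  induction hf : lines.length - i generalizing i with
  | zero =>
    have : lines.length ≤ i := by omega
    simp [List.drop_eq_nil_of_le this, pvAFindStart, pvBLoop]
  | succ n ih =>
    have hlt : i < lines.length := by omega
    have hdrop : List.drop i lines = lines[i] :: List.drop (i + 1) lines :=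
      List.drop_eq_getElem_cons hlt
    rw [hdrop]
    by_cases hm : (PySem.Str.strip lines[i] == start_header) = true
    · simp only [pvAFindStart, if_pos hm]
      have hge : i + 1 ≤ (pvAFindEnd lines next_header_list (i + 1)).getD lines.length := by
        cases hee : pvAFindEnd lines next_header_list (i + 1) with
        | none => simp; omega
        | some e' =>
          have := pvAFindEnd_ge lines next_header_list (i + 1) e' hee
          simp [hee]; omega
      have harith : (pvAFindEnd lines next_header_list (i + 1)).getD lines.length - i
          = ((pvAFindEnd lines next_header_list (i + 1)).getD lines.length - (i + 1)) + 1 := by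
        omega
      rw [PySem.List.slice_natCast, hdrop, harith, List.take_succ_cons,
        pvAFindEnd_take lines next_header_list (i + 1)]
      simp only [pvBLoop, if_pos hm, pvBLoop_true]
    · have hn : lines.length - (i + 1) = n := by omega
      have hrec := ih (i + 1) (by omega) hn
      simp only [pvAFindStart, pvBLoop, if_neg hm]
      exact hrec

-- ===== VERDICT (by name: the statement is the Claim_ definition above) =====
theorem extract_block_py_spec : Claim_equal_extract_block_py := by
  intro lines sh nhl _
  unfold Spec_extract_block_py extract_block_py extract_block_py_alt
  have := pvMain lines sh nhl 0 (Nat.zero_le _)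
  simpa using this
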